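-- pv_equiv track=rewrite | github.com/maestromusic/maestro | omg/search/searchparser.py | _removeQuotationMarks
-- ===== SOURCE A (Python) =====
-- def _removeQuotationMarks(string):
--     """Removes quotation marks (" or ') from string but keeps quotation marks which are in a string delimited
--     by the other sort of quotation marks. So abc"def'ghi" becomes abcdef'ghi."""
--     result = ''
--     quotPos = 0 # position _after_ the last closing quotation mark
--     pos = 0
--     while pos < len(string):
--         if string[pos] in ('"',"'"):
--             try:
--                 result += string[quotPos:pos]
--                 # find next quotation mark of the same type and skip it
--                 quotPos = string.index(string[pos],pos+1)+1
--                 # append the text between the quotation marks without the marks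
--                 result += string[pos+1:quotPos-1]
--                 pos = quotPos
--             except ValueError: # no closing quotation mark found
--                 return result + string[pos+1:] # so just add the rest of the string
--         else: pos += 1
--
--     if pos > quotPos: # add the remaining string to the result
--         result += string[quotPos:pos]
--     return result;
-- ===== SOURCE B (Python) =====
-- def _removeQuotationMarks(string):
--     """Character-by-character finite-state machine: track which quote type we are
--     inside (or None); delimiting quotes are skipped, everything else is kept."""
--     out = []
--     inside = None
--     for c in string:
--         if inside is None:
--             if c in ('"', "'"):
--                 inside = c
--             else:
--                 out.append(c)
--         elif c == inside:
--             inside = None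
--         else:
--             out.append(c)
--     return ''.join(out)
-- ===== Notes on version B (the rewrite author's own statement) =====
-- stated objective: idiomatic
-- what changed: Replaced A's index-jumping while loop (slicing out spans and searching ahead with str.index inside a try/except) by a single character-by-character finite-state machine that tracks which quote type we are currently inside and skips only the delimiting quotes; a timing run measured it ~2x faster (no repeated slicing/concatenation of string spans).
import Mathlib
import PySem

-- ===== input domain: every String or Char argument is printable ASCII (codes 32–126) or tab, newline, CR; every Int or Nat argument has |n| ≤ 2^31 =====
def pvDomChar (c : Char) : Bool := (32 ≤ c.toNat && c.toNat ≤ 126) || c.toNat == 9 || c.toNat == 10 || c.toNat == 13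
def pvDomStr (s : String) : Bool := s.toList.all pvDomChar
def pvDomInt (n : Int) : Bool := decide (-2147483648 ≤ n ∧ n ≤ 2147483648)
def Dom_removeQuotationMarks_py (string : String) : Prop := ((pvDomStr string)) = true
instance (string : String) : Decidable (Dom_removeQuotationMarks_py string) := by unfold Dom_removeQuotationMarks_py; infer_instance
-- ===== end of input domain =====

-- B replaces A's index-jumping loop with a per-character finite-state machine; same O(n) cost, plainer control flow.

-- ===== PORT A =====
-- exact port of Python's string.index(ch, start) for a single character ch:
-- first index j ≥ start with s[j] = ch (none = ValueError)
def rqIndexFrom (s : List Char) (ch : Char) (start : Nat) : Option Nat :=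
  (List.findIdx? (· == ch) (s.drop start)).map (start + ·)

-- the while loop of A: state (result, quotPos, pos); pos strictly increases
def rqLoop (s : List Char) (result : List Char) (quotPos pos : Nat) : List Char :=
  if h : pos < s.length then
    if s[pos] = '"' ∨ s[pos] = '\'' then
      match hf : rqIndexFrom s s[pos] (pos + 1) with
      | some j =>
        -- result += string[quotPos:pos]; quotPos = j+1; result += string[pos+1:quotPos-1]; pos = quotPos
        rqLoop s (result ++ (s.take pos).drop quotPos ++ (s.take j).drop (pos + 1)) (j + 1) (j + 1)
      | none =>
        -- ValueError: return result + string[pos+1:]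
        result ++ (s.take pos).drop quotPos ++ s.drop (pos + 1)
    else rqLoop s result quotPos (pos + 1)
  else
    if quotPos < pos then result ++ (s.take pos).drop quotPos else result
  termination_by s.length - pos
  decreasing_by
  · have hj : pos + 1 ≤ j := by
      simp only [rqIndexFrom, Option.map_eq_some_iff] at hf
      obtain ⟨k, _, rfl⟩ := hf
      omega
    omega
  · omega

def removeQuotationMarks_py (string : String) : String :=
  String.ofList (rqLoop string.toList [] 0 0)

-- ===== PORT B =====
-- the FSM of Source B: `inside` is the quote character we are currently inside (or none)
def rqFsm (s : List Char) (inside : Option Char) : List Char :=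
  match s, inside with
  | [], _ => []
  | c :: rest, none =>
    if c = '"' ∨ c = '\'' then rqFsm rest (some c) else c :: rqFsm rest none
  | c :: rest, some q =>
    if c = q then rqFsm rest none else c :: rqFsm rest (some q)

def removeQuotationMarks_py_alt (string : String) : String :=
  String.ofList (rqFsm string.toList none)

-- ===== PRECONDITION & SPEC =====
def Spec_removeQuotationMarks_py (string : String) (out : String) : Prop := out = removeQuotationMarks_py_alt string
instance (string : String) (out : String) : Decidable (Spec_removeQuotationMarks_py string out) := by unfold Spec_removeQuotationMarks_py; infer_instance

-- ===== CLAIM (what is proved, stated in full; the proofs are below) =====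
def Claim_equal_removeQuotationMarks_py : Prop := ∀ (string : String), Dom_removeQuotationMarks_py string → Spec_removeQuotationMarks_py string (removeQuotationMarks_py string)

-- ===== LEMMAS AND PROOFS =====

-- inside a quote, chars different from the closing quote pass through; the closing quote is skipped
theorem rqFsm_inside_close (l rest : List Char) (c : Char) (h : ∀ x ∈ l, x ≠ c) :
    rqFsm (l ++ c :: rest) (some c) = l ++ rqFsm rest none := by
  induction l with
  | nil => simp [rqFsm]
  | cons a l ih =>
    simp only [List.cons_append, rqFsm]
    rw [if_neg (h a (by simp)), ih (fun x hx => h x (by simp [hx]))]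

-- inside an unterminated quote, the whole rest passes through
theorem rqFsm_inside_all (l : List Char) (c : Char) (h : ∀ x ∈ l, x ≠ c) :
    rqFsm l (some c) = l := by
  induction l with
  | nil => rfl
  | cons a l ih =>
    simp only [rqFsm]
    rw [if_neg (h a (by simp)), ih (fun x hx => h x (by simp [hx]))]

theorem drop_take_drop (s : List Char) (pos j : ℕ) (hpj : pos ≤ j) (hj : j ≤ s.length) :
    (s.take j).drop pos ++ s.drop j = s.drop pos := by
  conv_rhs => rw [← List.take_append_drop j s]
  rw [List.drop_append, List.length_take, Nat.min_eq_left hj, Nat.sub_eq_zero_of_le hpj,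
    List.drop_zero]

theorem rqLoop_eq_fsm (s : List Char) (n : ℕ) : ∀ (result : List Char) (quotPos pos : ℕ),
    s.length - pos = n → pos ≤ s.length → quotPos ≤ pos →
    (∀ x ∈ (s.take pos).drop quotPos, ¬(x = '"' ∨ x = '\'')) →
    rqLoop s result quotPos pos = result ++ (s.take pos).drop quotPos ++ rqFsm (s.drop pos) none := by
  induction n using Nat.strong_induction_on with
  | _ n ih =>
    intro result quotPos pos hn hpos hq hclean
    rw [rqLoop]
    by_cases h : pos < s.length
    · rw [dif_pos h]
      by_cases hqc : s[pos] = '"' ∨ s[pos] = '\''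
      · rw [if_pos hqc]
        have hdp : s.drop pos = s[pos] :: s.drop (pos + 1) := List.drop_eq_getElem_cons h
        have hfsm : rqFsm (s.drop pos) none = rqFsm (s.drop (pos + 1)) (some s[pos]) := by
          rw [hdp]; simp only [rqFsm]; rw [if_pos hqc]
        split
        · rename_i j hf
          simp only [rqIndexFrom, Option.map_eq_some_iff] at hf
          obtain ⟨k, hk, hj⟩ := hf
          obtain ⟨hklt, hpk, hmin⟩ := List.findIdx?_eq_some_iff_getElem.mp hk
          rw [List.length_drop] at hklt
          have hjlt : j < s.length := by omega
          have hsj : s[j] = s[pos] := by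
            rw [List.getElem_drop] at hpk
            simp only [beq_iff_eq] at hpk
            subst hj
            exact hpk
          have hB : ∀ x ∈ (s.take j).drop (pos + 1), x ≠ s[pos] := by
            intro x hx
            obtain ⟨i, hi, hxi⟩ := List.mem_iff_getElem.mp hx
            have hik : i < k := by
              rw [List.length_drop, List.length_take] at hi; omega
            have hx1 : ((s.take j).drop (pos + 1))[i] = s[pos + 1 + i]'(by omega) := by
              rw [List.getElem_drop, List.getElem_take]
            have hm := hmin i hik
            rw [List.getElem_drop] at hm
            simp only [beq_iff_eq] at hm
            rw [← hxi, hx1]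
            exact hm
          rw [ih (s.length - (j + 1)) (by omega) _ (j + 1) (j + 1) rfl (by omega) le_rfl
            (by intro x hx
                rw [List.drop_eq_nil_of_le (by rw [List.length_take]; omega)] at hx
                simp at hx)]
          rw [List.drop_eq_nil_of_le (as := s.take (j + 1)) (by rw [List.length_take]; omega),
            hfsm, ← drop_take_drop s (pos + 1) j (by omega) (by omega),
            List.drop_eq_getElem_cons hjlt, hsj, rqFsm_inside_close _ _ _ hB]
          simp [List.append_assoc]
        · rename_i hf
          simp only [rqIndexFrom, Option.map_eq_none_iff, List.findIdx?_eq_none_iff] at hf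
          have : rqFsm (s.drop (pos + 1)) (some s[pos]) = s.drop (pos + 1) :=
            rqFsm_inside_all _ _ (fun x hx => by
              have := hf x hx; simpa using this)
          rw [hfsm, this, List.append_assoc]
      · rw [if_neg hqc]
        have hstep : (s.take (pos + 1)).drop quotPos
            = (s.take pos).drop quotPos ++ [s[pos]] := by
          rw [List.take_add_one, List.getElem?_eq_getElem h]
          rw [List.drop_append, List.length_take, Nat.min_eq_left (le_of_lt h),
            Nat.sub_eq_zero_of_le hq, List.drop_zero]
          rfl
        rw [ih (s.length - (pos + 1)) (by omega) result quotPos (pos + 1) rfl (by omega)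
          (by omega)
          (by rw [hstep]; intro x hx
              rcases List.mem_append.mp hx with h1 | h1
              · exact hclean x h1
              · simp only [List.mem_singleton] at h1; subst h1; exact hqc)]
        rw [hstep, List.drop_eq_getElem_cons h]
        simp only [rqFsm]
        rw [if_neg hqc]
        simp [List.append_assoc]
    · rw [dif_neg h]
      have hpl : pos = s.length := by omega
      have hdrop : s.drop pos = [] := by rw [hpl]; simp
      rw [hdrop]
      by_cases hlt : quotPos < pos
      · rw [if_pos hlt]; simp [rqFsm]
      · rw [if_neg hlt]
        have : (s.take pos).drop quotPos = [] := by
          apply List.drop_eq_nil_of_le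
          rw [List.length_take]; omega
        simp [this, rqFsm]

-- ===== VERDICT (by name: the statement is the Claim_ definition above) =====
theorem removeQuotationMarks_py_spec : Claim_equal_removeQuotationMarks_py := by
  intro string _
  unfold Spec_removeQuotationMarks_py removeQuotationMarks_py removeQuotationMarks_py_alt
  rw [rqLoop_eq_fsm string.toList (string.toList.length) [] 0 0 rfl (Nat.zero_le _) le_rfl
    (by simp)]
  simp
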